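-- pv_equiv track=rewrite | github.com/Bordei08/Python-course | Lab1/ex7.py | findNr
-- ===== SOURCE A (Python) =====
-- def findNr(txt):
--     res = ""
--     for i in str(txt):
--         if i.isdigit():
--             res = res + i
--         else:
--             res = res + "_"
--
--
--     res = res.split("_")
--     for i in range (0, len(res)):
--         if res[i] != '':
--             return int(res[i])
-- ===== SOURCE B (Python) =====
-- def findNr(txt):
--     run = ""
--     for ch in str(txt):
--         if ch.isdigit():
--             run = run + ch
--         elif run:
--             break
--     return int(run) if run else None
-- ===== Notes on version B (the rewrite author's own statement) =====
-- stated objective: simpler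
-- what changed: Replaces A's build-masked-copy, split-on-underscore and indexed scan of the resulting piece list by a single early-exiting pass that accumulates the first digit run directly and never builds the intermediate masked string or piece list.
import Mathlib
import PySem

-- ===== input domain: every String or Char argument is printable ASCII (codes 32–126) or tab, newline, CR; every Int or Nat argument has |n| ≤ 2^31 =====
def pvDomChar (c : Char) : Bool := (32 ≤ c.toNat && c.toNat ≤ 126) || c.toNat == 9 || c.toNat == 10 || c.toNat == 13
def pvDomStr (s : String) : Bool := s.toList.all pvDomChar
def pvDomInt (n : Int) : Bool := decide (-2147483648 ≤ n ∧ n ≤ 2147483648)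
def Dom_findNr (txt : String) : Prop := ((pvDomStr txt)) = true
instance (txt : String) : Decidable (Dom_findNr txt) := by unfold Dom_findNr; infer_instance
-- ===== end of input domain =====

-- B replaces A's masked-copy + split + list scan by one early-exiting pass over the characters (objective: simpler).

-- ===== PORT A =====
-- hand port of res.split("_") for the single-character separator "_": exact — Python splits
-- at every occurrence, keeping empty pieces, and ''.split('_') == ['']
def pvSplitUS : List Char → List (List Char)
  | [] => [[]]
  | c :: cs =>
    if c = '_' then [] :: pvSplitUS cs
    else
      match pvSplitUS cs with
      | p :: ps => (c :: p) :: ps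
      | [] => [[c]]

-- the second for-loop: first piece ≠ '' → return int(piece) (ofChars? none = ValueError, unreachable: pieces are digit runs)
def pvFirstNonempty : List (List Char) → Option Int
  | [] => none
  | p :: ps => if p ≠ [] then PySem.Int.ofChars? p else pvFirstNonempty ps

def findNr (txt : String) : Option Int :=
  let res := txt.toList.foldl (fun r c => if PySem.Chars.isdigit c then r ++ [c] else r ++ ['_']) []
  pvFirstNonempty (pvSplitUS res)

-- ===== PORT B =====
-- the single pass of Source B: collect the digit run; a non-digit after a non-empty run breaks
def pvRunLoop : List Char → List Char → List Char
  | [], run => run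
  | c :: cs, run =>
    if PySem.Chars.isdigit c then pvRunLoop cs (run ++ [c])
    else if run ≠ [] then run
    else pvRunLoop cs run

def findNr_alt (txt : String) : Option Int :=
  let run := pvRunLoop txt.toList []
  if run ≠ [] then PySem.Int.ofChars? run else none

-- ===== PRECONDITION & SPEC =====
def Spec_findNr (txt : String) (out : Option Int) : Prop := out = findNr_alt txt
instance (txt : String) (out : Option Int) : Decidable (Spec_findNr txt out) := by unfold Spec_findNr; infer_instance

-- ===== CLAIM (what is proved, stated in full; the proofs are below) =====
def Claim_equal_findNr : Prop := ∀ (txt : String), Dom_findNr txt → Spec_findNr txt (findNr txt)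

-- ===== LEMMAS AND PROOFS =====

def pvMask (c : Char) : Char := if PySem.Chars.isdigit c then c else '_'

theorem pvFold_eq_map (l : List Char) (r0 : List Char) :
    l.foldl (fun r c => if PySem.Chars.isdigit c then r ++ [c] else r ++ ['_']) r0
      = r0 ++ l.map pvMask := by
  induction l generalizing r0 with
  | nil => simp
  | cons c cs ih =>
    simp only [List.foldl_cons, List.map_cons, pvMask]
    by_cases h : PySem.Chars.isdigit c = true <;> simp [h, ih]

theorem pvDigit_ne_us {c : Char} (h : PySem.Chars.isdigit c = true) : c ≠ '_' := by
  intro he; subst he; simp [PySem.Chars.isdigit] at h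

theorem pvSplit_head (l : List Char) :
    ∃ ps, pvSplitUS (l.map pvMask) = l.takeWhile PySem.Chars.isdigit :: ps := by
  induction l with
  | nil => exact ⟨[], rfl⟩
  | cons c cs ih =>
    by_cases h : PySem.Chars.isdigit c = true
    · obtain ⟨ps, hps⟩ := ih
      refine ⟨ps, ?_⟩
      simp [pvSplitUS, pvMask, h, pvDigit_ne_us h, hps, List.takeWhile]
    · refine ⟨pvSplitUS (cs.map pvMask), ?_⟩
      simp [pvSplitUS, pvMask, h, List.takeWhile]

def pvFirstRun : List Char → List Char
  | [] => []
  | c :: cs =>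
    if PySem.Chars.isdigit c then c :: cs.takeWhile PySem.Chars.isdigit
    else pvFirstRun cs

theorem pvA_eq_firstRun (l : List Char) :
    pvFirstNonempty (pvSplitUS (l.map pvMask))
      = if pvFirstRun l ≠ [] then PySem.Int.ofChars? (pvFirstRun l) else none := by
  induction l with
  | nil => simp [pvSplitUS, pvFirstNonempty, pvFirstRun]
  | cons c cs ih =>
    by_cases h : PySem.Chars.isdigit c = true
    · obtain ⟨ps, hps⟩ := pvSplit_head cs
      simp [pvSplitUS, pvMask, h, pvDigit_ne_us h, hps, pvFirstNonempty, pvFirstRun]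
    · simp [pvSplitUS, pvMask, h, pvFirstNonempty, pvFirstRun, ih]

theorem pvRunLoop_ne_nil (l : List Char) (run : List Char) (h : run ≠ []) :
    pvRunLoop l run = run ++ l.takeWhile PySem.Chars.isdigit := by
  induction l generalizing run with
  | nil => simp [pvRunLoop]
  | cons c cs ih =>
    by_cases hd : PySem.Chars.isdigit c = true
    · simp [pvRunLoop, hd, List.takeWhile, ih (run ++ [c]) (by simp)]
    · simp [pvRunLoop, hd, h, List.takeWhile]

theorem pvRunLoop_nil (l : List Char) :
    pvRunLoop l [] = pvFirstRun l := by
  induction l with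
  | nil => rfl
  | cons c cs ih =>
    by_cases hd : PySem.Chars.isdigit c = true
    · simp [pvRunLoop, hd, pvFirstRun, pvRunLoop_ne_nil cs [c] (by simp)]
    · simp [pvRunLoop, hd, pvFirstRun, ih]

-- ===== VERDICT (by name: the statement is the Claim_ definition above) =====
theorem findNr_spec : Claim_equal_findNr := by
  intro txt _
  show findNr txt = findNr_alt txt
  unfold findNr findNr_alt
  simp only [pvFold_eq_map, List.nil_append, pvRunLoop_nil, pvA_eq_firstRun]
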